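-- pv_equiv track=rewrite | github.com/wildcraft958/AlphaStream_India | backend/src/agents/nlq/qna_agent.py | _simple_query_fallback
-- ===== SOURCE A (Python) =====
-- from typing import Any, AsyncGenerator, Literal, Optional
--
-- def _simple_query_fallback(query: str) -> Optional[str]:
--     """Simple keyword-based SQL fallback when Text2SQL isn't built yet."""
--     q = query.lower()
--     if any(w in q for w in ("signal", "opportunity", "alpha", "bullish", "bearish")):
--         return "SELECT * FROM v_signal_summary ORDER BY alpha_score DESC LIMIT 20"
--     if any(w in q for w in ("insider", "promoter", "bought", "sold", "sast")):
--         return "SELECT * FROM v_insider_activity_30d ORDER BY trade_date DESC LIMIT 20"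
--     if any(w in q for w in ("fii", "dii", "institutional", "foreign")):
--         return "SELECT * FROM v_fii_dii_trend ORDER BY date DESC LIMIT 20"
--     if any(w in q for w in ("sector", "heatmap")):
--         return "SELECT * FROM v_sector_heatmap"
--     if any(w in q for w in ("stock", "screener", "price")):
--         return "SELECT * FROM v_stock_screener LIMIT 20"
--     return None
-- ===== SOURCE B (Python) =====
-- from typing import Optional
--
-- # flat keyword -> rule-index map (no groups); rule index -> SQL
-- _KEYWORD_RULE = {
--     "signal": 0, "opportunity": 0, "alpha": 0, "bullish": 0, "bearish": 0,
--     "insider": 1, "promoter": 1, "bought": 1, "sold": 1, "sast": 1,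
--     "fii": 2, "dii": 2, "institutional": 2, "foreign": 2,
--     "sector": 3, "heatmap": 3,
--     "stock": 4, "screener": 4, "price": 4,
-- }
--
-- _SQL_BY_RULE = [
--     "SELECT * FROM v_signal_summary ORDER BY alpha_score DESC LIMIT 20",
--     "SELECT * FROM v_insider_activity_30d ORDER BY trade_date DESC LIMIT 20",
--     "SELECT * FROM v_fii_dii_trend ORDER BY date DESC LIMIT 20",
--     "SELECT * FROM v_sector_heatmap",
--     "SELECT * FROM v_stock_screener LIMIT 20",
-- ]
--
-- def _simple_query_fallback(query: str) -> Optional[str]: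
--     """Aggregate the minimal rule index over ALL matching keywords, then look up its SQL.
--
--     Correct because A's fall-through picks the first (lowest-index) rule with any hit,
--     which equals the minimum rule index over every matching keyword."""
--     q = query.lower()
--     best = min((idx for w, idx in _KEYWORD_RULE.items() if w in q), default=None)
--     return None if best is None else _SQL_BY_RULE[best]
-- ===== Notes on version B (the rewrite author's own statement) =====
-- stated objective: alternative
-- what changed: Replaces the ordered first-match group dispatch by a min-aggregation: every keyword in a flat keyword-to-rule-index map is tested (no short-circuit, no groups), the minimal matching rule index is taken, and the SQL is looked up in an array by that index.
import Mathlib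
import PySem

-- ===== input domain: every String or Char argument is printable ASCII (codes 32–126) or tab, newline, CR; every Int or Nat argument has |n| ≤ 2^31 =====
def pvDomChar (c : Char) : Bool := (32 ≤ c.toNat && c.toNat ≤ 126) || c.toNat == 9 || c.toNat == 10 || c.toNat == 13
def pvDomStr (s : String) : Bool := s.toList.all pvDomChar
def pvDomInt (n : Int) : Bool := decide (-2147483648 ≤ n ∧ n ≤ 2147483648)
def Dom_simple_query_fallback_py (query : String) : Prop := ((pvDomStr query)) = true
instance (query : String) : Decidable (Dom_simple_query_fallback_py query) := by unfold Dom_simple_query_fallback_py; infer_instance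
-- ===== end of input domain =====

-- B replaces A's first-match if-chain by a min-aggregation over a flat keyword->rule-index map plus an SQL array lookup (alternative algorithm, same cost).


-- ===== PORT A =====
def simple_query_fallback_py (query : String) : Option String :=
  let q := PySem.Str.lower query
  if ["signal", "opportunity", "alpha", "bullish", "bearish"].any (fun w => PySem.Str.isIn w q) then
    some "SELECT * FROM v_signal_summary ORDER BY alpha_score DESC LIMIT 20"
  else if ["insider", "promoter", "bought", "sold", "sast"].any (fun w => PySem.Str.isIn w q) then
    some "SELECT * FROM v_insider_activity_30d ORDER BY trade_date DESC LIMIT 20"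
  else if ["fii", "dii", "institutional", "foreign"].any (fun w => PySem.Str.isIn w q) then
    some "SELECT * FROM v_fii_dii_trend ORDER BY date DESC LIMIT 20"
  else if ["sector", "heatmap"].any (fun w => PySem.Str.isIn w q) then
    some "SELECT * FROM v_sector_heatmap"
  else if ["stock", "screener", "price"].any (fun w => PySem.Str.isIn w q) then
    some "SELECT * FROM v_stock_screener LIMIT 20"
  else
    none

-- ===== PORT B =====
-- Source B's flat keyword -> rule-index dict (insertion order) and rule-index -> SQL array
def pvKeywordRule : List (String × Nat) :=
  [("signal", 0), ("opportunity", 0), ("alpha", 0), ("bullish", 0), ("bearish", 0),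
   ("insider", 1), ("promoter", 1), ("bought", 1), ("sold", 1), ("sast", 1),
   ("fii", 2), ("dii", 2), ("institutional", 2), ("foreign", 2),
   ("sector", 3), ("heatmap", 3),
   ("stock", 4), ("screener", 4), ("price", 4)]

def pvSqlByRule : List String :=
  ["SELECT * FROM v_signal_summary ORDER BY alpha_score DESC LIMIT 20",
   "SELECT * FROM v_insider_activity_30d ORDER BY trade_date DESC LIMIT 20",
   "SELECT * FROM v_fii_dii_trend ORDER BY date DESC LIMIT 20",
   "SELECT * FROM v_sector_heatmap",
   "SELECT * FROM v_stock_screener LIMIT 20"]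

def simple_query_fallback_py_alt (query : String) : Option String :=
  let q := PySem.Str.lower query
  -- best = min((idx for w, idx in _KEYWORD_RULE.items() if w in q), default=None)
  let best := PySem.List.min?
    ((pvKeywordRule.filter (fun p => PySem.Str.isIn p.1 q)).map Prod.snd) (fun i => i)
  match best with
  | none => none
  | some i => PySem.List.pyGet? pvSqlByRule (Int.ofNat i)

-- ===== PRECONDITION & SPEC =====
def Spec_simple_query_fallback_py (query : String) (out : Option String) : Prop := out = simple_query_fallback_py_alt query
instance (query : String) (out : Option String) : Decidable (Spec_simple_query_fallback_py query out) := by unfold Spec_simple_query_fallback_py; infer_instance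

-- ===== CLAIM (what is proved, stated in full; the proofs are below) =====
def Claim_equal_simple_query_fallback_py : Prop := ∀ (query : String), Dom_simple_query_fallback_py query → Spec_simple_query_fallback_py query (simple_query_fallback_py query)

-- ===== LEMMAS AND PROOFS =====
theorem pv_foldl_min_self (x : ℕ) (t : List ℕ) (h : ∀ y ∈ t, x ≤ y) : t.foldl min x = x := by
  induction t generalizing x with
  | nil => rfl
  | cons a t ih =>
      simp only [List.foldl_cons]
      rw [min_eq_left (h a (by simp))]
      exact ih x fun y hy => h y (List.mem_cons_of_mem _ hy)

theorem pv_min?_sorted (l : List ℕ) (h : l.Pairwise (· ≤ ·)) :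
    PySem.List.min? l (fun i => i) = l.head? := by
  cases l with
  | nil => simp [PySem.List.min?]
  | cons x t =>
      rw [PySem.List.min?_id_cons, List.head?_cons]
      rw [pv_foldl_min_self x t (by simpa using (List.pairwise_cons.mp h).1)]

-- ===== VERDICT (by name: the statement is the Claim_ definition above) =====
theorem simple_query_fallback_py_spec : Claim_equal_simple_query_fallback_py := by
  intro query _
  unfold Spec_simple_query_fallback_py simple_query_fallback_py simple_query_fallback_py_alt
  have hpair : ((pvKeywordRule.filter (fun p => PySem.Str.isIn p.1 (PySem.Str.lower query))).map Prod.snd).Pairwise (· ≤ ·) := by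
    refine List.Pairwise.map _ (fun a b hab => hab) ?_
    exact List.Pairwise.sublist List.filter_sublist (by decide)
  dsimp only
  rw [pv_min?_sorted _ hpair]
  cases h1 : PySem.Str.isIn "signal" (PySem.Str.lower query) with
  | true => simp_all [pvKeywordRule, pvSqlByRule, PySem.List.pyGet?, PySem.List.pyIdx?]
  | false =>
    cases h2 : PySem.Str.isIn "opportunity" (PySem.Str.lower query) with
    | true => simp_all [pvKeywordRule, pvSqlByRule, PySem.List.pyGet?, PySem.List.pyIdx?]
    | false =>
      cases h3 : PySem.Str.isIn "alpha" (PySem.Str.lower query) with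
      | true => simp_all [pvKeywordRule, pvSqlByRule, PySem.List.pyGet?, PySem.List.pyIdx?]
      | false =>
        cases h4 : PySem.Str.isIn "bullish" (PySem.Str.lower query) with
        | true => simp_all [pvKeywordRule, pvSqlByRule, PySem.List.pyGet?, PySem.List.pyIdx?]
        | false =>
          cases h5 : PySem.Str.isIn "bearish" (PySem.Str.lower query) with
          | true => simp_all [pvKeywordRule, pvSqlByRule, PySem.List.pyGet?, PySem.List.pyIdx?]
          | false =>
            cases h6 : PySem.Str.isIn "insider" (PySem.Str.lower query) with
            | true => simp_all [pvKeywordRule, pvSqlByRule, PySem.List.pyGet?, PySem.List.pyIdx?]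
            | false =>
              cases h7 : PySem.Str.isIn "promoter" (PySem.Str.lower query) with
              | true => simp_all [pvKeywordRule, pvSqlByRule, PySem.List.pyGet?, PySem.List.pyIdx?]
              | false =>
                cases h8 : PySem.Str.isIn "bought" (PySem.Str.lower query) with
                | true => simp_all [pvKeywordRule, pvSqlByRule, PySem.List.pyGet?, PySem.List.pyIdx?]
                | false =>
                  cases h9 : PySem.Str.isIn "sold" (PySem.Str.lower query) with
                  | true => simp_all [pvKeywordRule, pvSqlByRule, PySem.List.pyGet?, PySem.List.pyIdx?]
                  | false =>
                    cases h10 : PySem.Str.isIn "sast" (PySem.Str.lower query) with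
                    | true => simp_all [pvKeywordRule, pvSqlByRule, PySem.List.pyGet?, PySem.List.pyIdx?]
                    | false =>
                      cases h11 : PySem.Str.isIn "fii" (PySem.Str.lower query) with
                      | true => simp_all [pvKeywordRule, pvSqlByRule, PySem.List.pyGet?, PySem.List.pyIdx?]
                      | false =>
                        cases h12 : PySem.Str.isIn "dii" (PySem.Str.lower query) with
                        | true => simp_all [pvKeywordRule, pvSqlByRule, PySem.List.pyGet?, PySem.List.pyIdx?]
                        | false =>
                          cases h13 : PySem.Str.isIn "institutional" (PySem.Str.lower query) with
                          | true => simp_all [pvKeywordRule, pvSqlByRule, PySem.List.pyGet?, PySem.List.pyIdx?]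
                          | false =>
                            cases h14 : PySem.Str.isIn "foreign" (PySem.Str.lower query) with
                            | true => simp_all [pvKeywordRule, pvSqlByRule, PySem.List.pyGet?, PySem.List.pyIdx?]
                            | false =>
                              cases h15 : PySem.Str.isIn "sector" (PySem.Str.lower query) with
                              | true => simp_all [pvKeywordRule, pvSqlByRule, PySem.List.pyGet?, PySem.List.pyIdx?]
                              | false =>
                                cases h16 : PySem.Str.isIn "heatmap" (PySem.Str.lower query) with
                                | true => simp_all [pvKeywordRule, pvSqlByRule, PySem.List.pyGet?, PySem.List.pyIdx?]
                                | false =>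
                                  cases h17 : PySem.Str.isIn "stock" (PySem.Str.lower query) with
                                  | true => simp_all [pvKeywordRule, pvSqlByRule, PySem.List.pyGet?, PySem.List.pyIdx?]
                                  | false =>
                                    cases h18 : PySem.Str.isIn "screener" (PySem.Str.lower query) with
                                    | true => simp_all [pvKeywordRule, pvSqlByRule, PySem.List.pyGet?, PySem.List.pyIdx?]
                                    | false =>
                                      cases h19 : PySem.Str.isIn "price" (PySem.Str.lower query) with
                                      | true => simp_all [pvKeywordRule, pvSqlByRule, PySem.List.pyGet?, PySem.List.pyIdx?]
                                      | false =>
                                        simp_all [pvKeywordRule]
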